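-- pv_equiv track=rewrite | github.com/zwf999/YinYang_universal-four-track-analyzer | _archive/scripts/000000-new-zuixin-dna-streaming.py | separate_coding_non_coding
-- ===== SOURCE A (Python) =====
-- from typing import List, Dict, Tuple
--
-- def separate_coding_non_coding(dna_sequence: str, coding_regions: List[Tuple[int, int]]) -> Tuple[str, str]:
--     """分离编码区和非编码区，使用优化算法"""
--     coding_sequence = []
--     non_coding_sequence = []
--
--     n = len(dna_sequence)
--     region_index = 0
--     num_regions = len(coding_regions)
--
--     i = 0
--     while i < n:
--         current_pos = i + 1
--
--         in_coding = False
--         while region_index < num_regions: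
--             start, end = coding_regions[region_index]
--             if current_pos < start:
--                 break
--             elif start <= current_pos <= end:
--                 in_coding = True
--                 end_in_sequence = min(end, n)
--                 coding_sequence.append(dna_sequence[i:end_in_sequence])
--                 i = end_in_sequence
--                 current_pos = end_in_sequence + 1
--                 region_index += 1
--                 break
--             else:
--                 region_index += 1
--
--         if not in_coding and i < n:
--             next_coding_start = n + 1
--             if region_index < num_regions:
--                 next_coding_start = coding_regions[region_index][0]
--             non_coding_end = min(next_coding_start - 1, n)
--             non_coding_sequence.append(dna_sequence[i:non_coding_end])
--             i = non_coding_end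
--
--     return ''.join(coding_sequence), ''.join(non_coding_sequence)
-- ===== SOURCE B (Python) =====
-- from typing import List, Tuple
--
-- def separate_coding_non_coding(dna_sequence: str, coding_regions: List[Tuple[int, int]]) -> Tuple[str, str]:
--     """Region-driven single pass: one cursor walks forward over the regions."""
--     n = len(dna_sequence)
--     coding = []
--     non_coding = []
--     cur = 0
--     for start, end in coding_regions:
--         if cur < start - 1:
--             stop = min(start - 1, n)
--             non_coding.append(dna_sequence[cur:stop])
--             cur = stop
--         stop = min(end, n)
--         if cur < stop:
--             coding.append(dna_sequence[cur:stop])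
--             cur = stop
--     if cur < n:
--         non_coding.append(dna_sequence[cur:n])
--     return ''.join(coding), ''.join(non_coding)
-- ===== Notes on version B (the rewrite author's own statement) =====
-- stated objective: simpler
-- what changed: A's position-driven outer while-loop with a nested region-scanning inner while is replaced by a single for-loop over the regions carrying a monotone cursor (gap slice, then coding slice per region, trailing gap at the end).
import Mathlib
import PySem

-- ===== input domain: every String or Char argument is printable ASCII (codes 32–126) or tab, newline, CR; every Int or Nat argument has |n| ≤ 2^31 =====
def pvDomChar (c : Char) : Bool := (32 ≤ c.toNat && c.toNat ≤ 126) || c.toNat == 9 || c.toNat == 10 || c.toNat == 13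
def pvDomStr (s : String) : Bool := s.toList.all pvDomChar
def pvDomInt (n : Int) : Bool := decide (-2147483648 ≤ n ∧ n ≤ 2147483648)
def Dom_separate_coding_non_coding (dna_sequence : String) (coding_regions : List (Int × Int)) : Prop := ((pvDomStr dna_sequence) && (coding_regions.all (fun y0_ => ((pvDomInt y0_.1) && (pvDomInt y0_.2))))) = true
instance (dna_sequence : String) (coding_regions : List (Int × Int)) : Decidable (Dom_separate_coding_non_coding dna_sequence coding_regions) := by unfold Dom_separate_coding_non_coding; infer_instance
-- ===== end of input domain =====

-- B replaces A's position-driven sweep (outer while over positions with a nested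
-- region-scanning while) by a single cursor-carrying pass over the region list;
-- string pieces are accumulated as char lists and joined at the end (''.join).

-- ===== PORT A =====
-- the inner `while region_index < num_regions` loop of A, over the remaining suffix of
-- coding_regions; returns (some end_in_sequence, rest) on the coding hit, else
-- (none, remaining regions at the break / exhaustion point)
def pvInner (n i : Int) : List (Int × Int) → Option Int × List (Int × Int)
  | [] => (none, [])
  | (s, e) :: rest =>
    if i + 1 < s then (none, (s, e) :: rest)
    else if s ≤ i + 1 ∧ i + 1 ≤ e then (some (min e n), rest)
    else pvInner n i rest

-- the two facts the outer loop's termination needs (cited by decreasing_by)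
theorem pvInner_hit {n i e' : Int} : ∀ {regs rest}, pvInner n i regs = (some e', rest) → i < n → i < e' := by
  intro regs
  induction regs with
  | nil => intro rest h; simp [pvInner] at h
  | cons p r ih =>
    intro rest h hn
    obtain ⟨s, e⟩ := p
    simp only [pvInner] at h
    split_ifs at h with h1 h2
    · simp at h
    · obtain ⟨he, -⟩ := Prod.mk.injEq .. ▸ h
      have : e' = min e n := by simpa using he.symm
      omega
    · exact ih h hn

theorem pvInner_none_cons {n i s e : Int} : ∀ {regs rest}, pvInner n i regs = (none, (s, e) :: rest) → i + 1 < s := by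
  intro regs
  induction regs with
  | nil => intro rest h; simp [pvInner] at h
  | cons p r ih =>
    intro rest h
    obtain ⟨s0, e0⟩ := p
    simp only [pvInner] at h
    split_ifs at h with h1 h2
    · simp at h; omega
    · simp at h
    · exact ih h

-- A's outer `while i < n` loop: state (i, remaining regions, coding, non_coding)
def pvOuterA (chars : List Char) (n : Int) (i : Int) (regs : List (Int × Int))
    (cod ncod : List Char) : List Char × List Char :=
  if hlt : i < n then
    match hm : pvInner n i regs with
    | (some e', rest) =>
        pvOuterA chars n e' rest (cod ++ PySem.List.slice chars (some i) (some e')) ncod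
    | (none, rest) =>
        -- `not in_coding and i < n`: next_coding_start, then the non-coding slice
        let next : Int := match rest with | [] => n + 1 | (s, _) :: _ => s
        let nce : Int := min (next - 1) n
        pvOuterA chars n nce rest cod (ncod ++ PySem.List.slice chars (some i) (some nce))
  else (cod, ncod)
termination_by (n - i).toNat
decreasing_by
  · have := pvInner_hit hm hlt; omega
  · rcases rest with _ | ⟨⟨s, e⟩, r⟩
    · simp; omega
    · have := pvInner_none_cons hm; simp; omega

def separate_coding_non_coding (dna_sequence : String) (coding_regions : List (Int × Int)) : String × String :=
  let chars := dna_sequence.toList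
  let n : Int := chars.length
  let r := pvOuterA chars n 0 coding_regions [] []
  (String.ofList r.1, String.ofList r.2)

-- ===== PORT B =====
-- one iteration of B's `for start, end in coding_regions` loop: state (cur, coding, non_coding)
def pvStepB (chars : List Char) (n : Int) (st : Int × List Char × List Char)
    (r : Int × Int) : Int × List Char × List Char :=
  let cur := st.1
  let cod := st.2.1
  let ncod := st.2.2
  let s := r.1
  let e := r.2
  let (cur1, ncod1) :=
    if cur < s - 1 then
      let stop := min (s - 1) n
      (stop, ncod ++ PySem.List.slice chars (some cur) (some stop))
    else (cur, ncod)
  let stop := min e n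
  if cur1 < stop then (stop, cod ++ PySem.List.slice chars (some cur1) (some stop), ncod1)
  else (cur1, cod, ncod1)

def separate_coding_non_coding_alt (dna_sequence : String) (coding_regions : List (Int × Int)) : String × String :=
  let chars := dna_sequence.toList
  let n : Int := chars.length
  let st := coding_regions.foldl (pvStepB chars n) (0, [], [])
  let ncod := if st.1 < n then st.2.2 ++ PySem.List.slice chars (some st.1) (some n) else st.2.2
  (String.ofList st.2.1, String.ofList ncod)

-- ===== PRECONDITION & SPEC =====
def Spec_separate_coding_non_coding (dna_sequence : String) (coding_regions : List (Int × Int)) (out : String × String) : Prop := out = separate_coding_non_coding_alt dna_sequence coding_regions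
instance (dna_sequence : String) (coding_regions : List (Int × Int)) (out : String × String) : Decidable (Spec_separate_coding_non_coding dna_sequence coding_regions out) := by unfold Spec_separate_coding_non_coding; infer_instance

-- ===== CLAIM (what is proved, stated in full; the proofs are below) =====
def Claim_equal_separate_coding_non_coding : Prop := ∀ (dna_sequence : String) (coding_regions : List (Int × Int)), Dom_separate_coding_non_coding dna_sequence coding_regions → Spec_separate_coding_non_coding dna_sequence coding_regions (separate_coding_non_coding dna_sequence coding_regions)

-- ===== LEMMAS AND PROOFS =====

theorem slice_same (xs : List Char) (a : Int) : PySem.List.slice xs (some a) (some a) = [] := by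
  have h := PySem.List.length_slice xs a a
  simp at h
  exact h

-- pvOuterA unfolded for a known pvInner value
theorem outerA_hit (chars : List Char) {n i e' : Int} {regs rest : List (Int × Int)}
    (cod ncod : List Char) (h : i < n) (hm : pvInner n i regs = (some e', rest)) :
    pvOuterA chars n i regs cod ncod =
      pvOuterA chars n e' rest (cod ++ PySem.List.slice chars (some i) (some e')) ncod := by
  rw [pvOuterA]
  simp only [dif_pos h]
  split
  next e2 rest2 heq =>
    have h3 := (heq.symm.trans hm)
    simp only [Prod.mk.injEq, Option.some.injEq] at h3
    obtain ⟨rfl, rfl⟩ : e2 = e' ∧ rest2 = rest := ⟨h3.1, h3.2⟩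
    rfl
  next rest2 heq => exact absurd (heq.symm.trans hm) (by simp)

theorem outerA_none (chars : List Char) {n i : Int} {regs rest : List (Int × Int)}
    (cod ncod : List Char) (h : i < n) (hm : pvInner n i regs = (none, rest)) :
    pvOuterA chars n i regs cod ncod =
      pvOuterA chars n (min ((match rest with | [] => n + 1 | (s, _) :: _ => s) - 1) n) rest cod
        (ncod ++ PySem.List.slice chars (some i)
          (some (min ((match rest with | [] => n + 1 | (s, _) :: _ => s) - 1) n))) := by
  rw [pvOuterA]
  simp only [dif_pos h]
  split
  next e2 rest2 heq => exact absurd (heq.symm.trans hm) (by simp)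
  next rest2 heq =>
    have h3 := (heq.symm.trans hm)
    simp only [Prod.mk.injEq] at h3
    obtain rfl : rest2 = rest := h3.2
    rfl

theorem outerA_stop (chars : List Char) {n i : Int} (regs : List (Int × Int))
    (cod ncod : List Char) (h : ¬ i < n) :
    pvOuterA chars n i regs cod ncod = (cod, ncod) := by
  rw [pvOuterA]; simp only [dif_neg h]

-- the crux: one group of A's outer iterations that resolves the head region
-- equals one pvStepB step of B
theorem outer_cons (chars : List Char) (n i s e : Int) (rest : List (Int × Int))
    (cod ncod : List Char) (h : i < n) :
    pvOuterA chars n i ((s, e) :: rest) cod ncod =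
      pvOuterA chars n (pvStepB chars n (i, cod, ncod) (s, e)).1 rest
        (pvStepB chars n (i, cod, ncod) (s, e)).2.1
        (pvStepB chars n (i, cod, ncod) (s, e)).2.2 := by
  by_cases h1 : i + 1 < s
  · -- gap first: inner breaks on the head region
    have hinner : pvInner n i ((s, e) :: rest) = (none, (s, e) :: rest) := by
      simp [pvInner, h1]
    rw [outerA_none chars cod ncod h hinner]
    set i1 : Int := min (s - 1) n with hi1
    have hstep : pvStepB chars n (i, cod, ncod) (s, e) =
        (if i1 < min e n then (min e n, cod ++ PySem.List.slice chars (some i1) (some (min e n)),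
            ncod ++ PySem.List.slice chars (some i) (some i1))
         else (i1, cod, ncod ++ PySem.List.slice chars (some i) (some i1))) := by
      simp only [pvStepB]
      rw [if_pos (by omega : i < s - 1)]
    by_cases h4 : i1 < n
    · have hs1 : i1 = s - 1 := by omega
      by_cases h2 : s ≤ e
      · have hinner2 : pvInner n i1 ((s, e) :: rest) = (some (min e n), rest) := by
          simp [pvInner, hs1]; try omega
        rw [outerA_hit chars _ _ h4 hinner2, hstep, if_pos (by omega : i1 < min e n)]
      · have hinner2 : pvInner n i1 ((s, e) :: rest) = pvInner n i1 rest := by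
          simp [pvInner, hs1]; try omega
        rw [hstep, if_neg (by omega : ¬ i1 < min e n)]
        rcases hv : pvInner n i1 rest with ⟨o, rest1⟩
        rcases o with _ | e2
        · rw [outerA_none chars _ _ h4 (hinner2.trans hv), outerA_none chars _ _ h4 hv]
          simp only [List.append_assoc]
          rcases rest1 with _ | ⟨⟨s2, e2⟩, r2⟩ <;> rfl
        · rw [outerA_hit chars _ _ h4 (hinner2.trans hv), outerA_hit chars _ _ h4 hv]
    · -- i1 = n: A's outer loop ends; B's coding branch cannot fire either
      rw [hstep, if_neg (by omega : ¬ i1 < min e n)]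
      rw [outerA_stop chars _ _ _ h4, outerA_stop chars _ _ _ h4]
  · by_cases h2 : i + 1 ≤ e
    · -- direct coding hit
      have hinner : pvInner n i ((s, e) :: rest) = (some (min e n), rest) := by
        simp [pvInner, h1, h2]; try omega
      have hstep : pvStepB chars n (i, cod, ncod) (s, e) =
          (min e n, cod ++ PySem.List.slice chars (some i) (some (min e n)), ncod) := by
        simp only [pvStepB]
        rw [if_neg (by omega : ¬ i < s - 1), if_pos (by omega : i < min e n)]
      rw [outerA_hit chars cod ncod h hinner, hstep]
    · -- A's inner loop skips the head region; B's step is a no-op on it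
      have hinner : pvInner n i ((s, e) :: rest) = pvInner n i rest := by
        simp [pvInner, h1]; try omega
      have hstep : pvStepB chars n (i, cod, ncod) (s, e) = (i, cod, ncod) := by
        simp only [pvStepB]
        rw [if_neg (by omega : ¬ i < s - 1), if_neg (by omega : ¬ i < min e n)]
      rw [hstep]
      rcases hv : pvInner n i rest with ⟨o, rest1⟩
      rcases o with _ | e2
      · rw [outerA_none chars _ _ h (hinner.trans hv), outerA_none chars _ _ h hv]
        rcases rest1 with _ | ⟨⟨s2, e2⟩, r2⟩ <;> rfl
      · rw [outerA_hit chars _ _ h (hinner.trans hv), outerA_hit chars _ _ h hv]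

-- B's trailing non-coding flush
def pvFin (chars : List Char) (n : Int) (st : Int × List Char × List Char) : List Char × List Char :=
  (st.2.1, if st.1 < n then st.2.2 ++ PySem.List.slice chars (some st.1) (some n) else st.2.2)

theorem stepB_cursor_le (chars : List Char) {n i : Int} (cod ncod : List Char) (s e : Int)
    (h : i ≤ n) : (pvStepB chars n (i, cod, ncod) (s, e)).1 ≤ n := by
  simp only [pvStepB]
  split_ifs <;> simp <;> omega

theorem stepB_stall (chars : List Char) (n : Int) (cod ncod : List Char) (s e : Int) :
    pvStepB chars n (n, cod, ncod) (s, e) = (n, cod, ncod) := by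
  simp only [pvStepB]
  by_cases h1 : n < s - 1
  · rw [if_pos h1]
    have hmin : min (s - 1) n = n := by omega
    rw [hmin, slice_same, List.append_nil, if_neg (by omega : ¬ n < min e n)]
  · rw [if_neg h1, if_neg (by omega : ¬ n < min e n)]

theorem main_lemma (chars : List Char) (n : Int) (regs : List (Int × Int)) :
    ∀ (i : Int) (cod ncod : List Char), i ≤ n →
      pvOuterA chars n i regs cod ncod =
        pvFin chars n (regs.foldl (pvStepB chars n) (i, cod, ncod)) := by
  induction regs with
  | nil =>
    intro i cod ncod hle
    simp only [List.foldl_nil, pvFin]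
    by_cases h : i < n
    · have hinner : pvInner n i [] = (none, []) := rfl
      rw [outerA_none chars cod ncod h hinner]
      have : min (n + 1 - 1) n = n := by omega
      rw [this, outerA_stop chars _ _ _ (by omega : ¬ n < n), if_pos h]
    · rw [outerA_stop chars _ _ _ h, if_neg h]
  | cons p rest ih =>
    intro i cod ncod hle
    obtain ⟨s, e⟩ := p
    rw [List.foldl_cons]
    by_cases h : i < n
    · rw [outer_cons chars n i s e rest cod ncod h]
      exact ih _ _ _ (stepB_cursor_le chars cod ncod s e hle)
    · have hi : i = n := by omega
      subst hi
      rw [stepB_stall, outerA_stop chars _ _ _ h, ← ih i cod ncod hle,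
        outerA_stop chars _ _ _ h]

-- ===== VERDICT (by name: the statement is the Claim_ definition above) =====
theorem separate_coding_non_coding_spec : Claim_equal_separate_coding_non_coding := by
  intro dna_sequence coding_regions _
  unfold Spec_separate_coding_non_coding
  simp only [separate_coding_non_coding, separate_coding_non_coding_alt]
  rw [main_lemma dna_sequence.toList (dna_sequence.toList.length : Int) coding_regions 0 [] []
    (Int.natCast_nonneg _)]
  rfl
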